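-- pv_equiv track=rewrite | github.com/xiongchenyan/cxPyLib | cxBase/SimpleFeatureBase.py | MinFeatureValue
-- ===== SOURCE A (Python) =====
-- def MinFeatureValue(lFeature):
--     hMin = {}
--     for hFeature in lFeature:
--         for key,value in hFeature.items():
--             if not key in hMin:
--                 hMin[key] = value
--             else:
--                 hMin[key] = min(value,hMin[key])
--     return hMin
-- ===== SOURCE B (Python) =====
-- def MinFeatureValue(lFeature):
--     # group-then-reduce: first collect every value per key, then take each minimum
--     grouped = {}
--     for hFeature in lFeature:
--         for key, value in hFeature.items():
--             grouped[key] = grouped.get(key, []) + [value]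
--     return {key: min(values) for key, values in grouped.items()}
-- ===== Notes on version B (the rewrite author's own statement) =====
-- stated objective: alternative
-- what changed: Replaced A's running-minimum accumulator fold with a two-pass group-then-reduce: first build an index mapping each key to the list of all its values, then produce the result as {key: min(values)} over that index.
import Mathlib
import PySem

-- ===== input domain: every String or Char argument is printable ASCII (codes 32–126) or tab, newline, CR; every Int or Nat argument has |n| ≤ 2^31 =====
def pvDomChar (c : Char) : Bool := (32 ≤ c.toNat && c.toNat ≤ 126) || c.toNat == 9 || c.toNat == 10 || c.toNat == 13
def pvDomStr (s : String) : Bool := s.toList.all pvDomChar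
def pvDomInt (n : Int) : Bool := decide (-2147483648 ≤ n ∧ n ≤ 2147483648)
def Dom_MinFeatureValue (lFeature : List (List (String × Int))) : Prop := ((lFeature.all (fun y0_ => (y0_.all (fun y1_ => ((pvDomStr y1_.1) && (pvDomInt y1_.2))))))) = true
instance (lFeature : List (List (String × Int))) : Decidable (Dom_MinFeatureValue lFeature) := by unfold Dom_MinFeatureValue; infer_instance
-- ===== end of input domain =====

-- B replaces A's running-minimum fold by a two-pass group-then-reduce (collect all values per key, then take each minimum); same cost, alternative decomposition.

-- ===== PORT A =====
def MinFeatureValue (lFeature : List (List (String × Int))) : List (String × Int) :=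
  (lFeature.foldl (fun hMin hFeature =>
    hFeature.foldl (fun hMin kv =>
      if hMin.contains kv.1 = false then hMin.insert kv.1 kv.2
      else hMin.insert kv.1 (min kv.2 (hMin.getD kv.1 0))) hMin)
    (PySem.Dict.empty : PySem.Dict String Int)).items

-- ===== PORT B =====
-- Python's builtin min of a nonempty int list (the 0 default is never reached: grouped lists are nonempty).
def pyMinList : List Int → Int
  | [] => 0
  | a :: r => r.foldl min a

def MinFeatureValue_alt (lFeature : List (List (String × Int))) : List (String × Int) :=
  let grouped := lFeature.foldl (fun g hFeature =>
    hFeature.foldl (fun g kv => g.insert kv.1 (g.getD kv.1 [] ++ [kv.2])) g)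
    (PySem.Dict.empty : PySem.Dict String (List Int))
  grouped.items.map (fun p => (p.1, pyMinList p.2))

-- ===== PRECONDITION & SPEC =====
def Spec_MinFeatureValue (lFeature : List (List (String × Int))) (out : List (String × Int)) : Prop := out = MinFeatureValue_alt lFeature
instance (lFeature : List (List (String × Int))) (out : List (String × Int)) : Decidable (Spec_MinFeatureValue lFeature out) := by unfold Spec_MinFeatureValue; infer_instance

-- ===== CLAIM (what is proved, stated in full; the proofs are below) =====
def Claim_equal_MinFeatureValue : Prop := ∀ (lFeature : List (List (String × Int))), Dom_MinFeatureValue lFeature → Spec_MinFeatureValue lFeature (MinFeatureValue lFeature)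

-- ===== LEMMAS AND PROOFS =====

-- the per-key reduction applied to a whole grouping dict
def pvFin (p : String × List Int) : String × Int := (p.1, pyMinList p.2)

def pvMapFin (g : PySem.Dict String (List Int)) : PySem.Dict String Int :=
  PySem.Dict.mk (g.items.map pvFin)

lemma pyMinList_append_singleton (vs : List Int) (hvs : vs ≠ []) (v : Int) :
    pyMinList (vs ++ [v]) = min v (pyMinList vs) := by
  cases vs with
  | nil => exact absurd rfl hvs
  | cons a r => simp [pyMinList, List.foldl_append, min_comm]

lemma get?_mk_map (l : List (String × List Int)) (k : String) :
    (PySem.Dict.mk (l.map pvFin)).get? k = ((PySem.Dict.mk l).get? k).map pyMinList := by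
  induction l with
  | nil => rfl
  | cons p rest ih =>
      obtain ⟨pk, pv⟩ := p
      simp only [List.map_cons, pvFin, PySem.Dict.get?_mk_cons]
      split_ifs <;> simp [ih]

lemma get?_pvMapFin (g : PySem.Dict String (List Int)) (k : String) :
    (pvMapFin g).get? k = (g.get? k).map pyMinList := by
  have := get?_mk_map g.items k
  cases g
  exact this

lemma contains_pvMapFin (g : PySem.Dict String (List Int)) (k : String) :
    (pvMapFin g).contains k = g.contains k := by
  rw [PySem.Dict.contains_eq_isSome_get?, PySem.Dict.contains_eq_isSome_get?, get?_pvMapFin]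
  cases g.get? k <;> rfl

def pvInv (g : PySem.Dict String (List Int)) : Prop := ∀ p ∈ g.items, p.2 ≠ []

-- one update step commutes with the final reduction
lemma pvStep (g : PySem.Dict String (List Int)) (hinv : pvInv g) (k : String) (v : Int) :
    (if (pvMapFin g).contains k = false then (pvMapFin g).insert k v
     else (pvMapFin g).insert k (min v ((pvMapFin g).getD k 0)))
      = pvMapFin (g.insert k (g.getD k [] ++ [v])) := by
  cases hg : g.get? k with
  | none =>
      have hc : g.contains k = false := by
        rw [PySem.Dict.contains_eq_isSome_get?, hg]; rfl
      have hc' : (pvMapFin g).contains k = false := by rw [contains_pvMapFin]; exact hc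
      rw [if_pos hc']
      apply PySem.Dict.ext
      rw [PySem.Dict.items_insert_of_not_contains _ _ hc',
        PySem.Dict.getD_of_get?_eq_none _ _ hg]
      show (pvMapFin g).items ++ [(k, v)]
          = (g.insert k ([] ++ [v])).items.map pvFin
      rw [PySem.Dict.items_insert_of_not_contains _ _ hc]
      simp [pvMapFin, pvFin, pyMinList]
  | some vs =>
      have hc : g.contains k = true := by
        rw [PySem.Dict.contains_eq_isSome_get?, hg]; rfl
      have hc' : (pvMapFin g).contains k = true := by rw [contains_pvMapFin]; exact hc
      have hvs : vs ≠ [] := hinv (k, vs) (PySem.Dict.mem_items_of_get?_eq_some g hg)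
      have hgd : (pvMapFin g).getD k 0 = pyMinList vs := by
        apply PySem.Dict.getD_of_get?_eq_some
        rw [get?_pvMapFin, hg]; rfl
      rw [if_neg (by simp [hc']), hgd]
      apply PySem.Dict.ext
      rw [PySem.Dict.items_insert_of_contains _ _ hc',
        PySem.Dict.getD_of_get?_eq_some _ _ hg]
      show ((pvMapFin g).items).map (fun p => if (p.1 == k) = true then (k, min v (pyMinList vs)) else p)
          = (g.insert k (vs ++ [v])).items.map pvFin
      rw [PySem.Dict.items_insert_of_contains _ _ hc]
      simp only [pvMapFin, List.map_map]
      apply List.map_congr_left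
      intro p _
      by_cases h : p.1 = k <;>
        simp [pvFin, h, pyMinList_append_singleton vs hvs v]

lemma pvInv_insert (g : PySem.Dict String (List Int)) (hinv : pvInv g) (k : String) (v : Int) :
    pvInv (g.insert k (g.getD k [] ++ [v])) := by
  intro p hp
  rcases (PySem.Dict.mem_items_insert g k _ p).1 hp with h | ⟨h, _⟩
  · subst h; simp
  · exact hinv p h

-- the inner loop over one feature dict
lemma pvInner (ps : List (String × Int)) :
    ∀ (g : PySem.Dict String (List Int)), pvInv g →
      ps.foldl (fun hMin kv =>
          if hMin.contains kv.1 = false then hMin.insert kv.1 kv.2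
          else hMin.insert kv.1 (min kv.2 (hMin.getD kv.1 0))) (pvMapFin g)
        = pvMapFin (ps.foldl (fun g kv => g.insert kv.1 (g.getD kv.1 [] ++ [kv.2])) g)
      ∧ pvInv (ps.foldl (fun g kv => g.insert kv.1 (g.getD kv.1 [] ++ [kv.2])) g) := by
  induction ps with
  | nil => exact fun g hg => ⟨rfl, hg⟩
  | cons kv rest ih =>
      intro g hg
      have h1 := pvStep g hg kv.1 kv.2
      have h2 := pvInv_insert g hg kv.1 kv.2
      simp only [List.foldl_cons]
      rw [h1]
      exact ih _ h2

-- the outer loop over the list of feature dicts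
lemma pvOuter (l : List (List (String × Int))) :
    ∀ (g : PySem.Dict String (List Int)), pvInv g →
      l.foldl (fun hMin hFeature =>
          hFeature.foldl (fun hMin kv =>
            if hMin.contains kv.1 = false then hMin.insert kv.1 kv.2
            else hMin.insert kv.1 (min kv.2 (hMin.getD kv.1 0))) hMin) (pvMapFin g)
        = pvMapFin (l.foldl (fun g hFeature =>
            hFeature.foldl (fun g kv => g.insert kv.1 (g.getD kv.1 [] ++ [kv.2])) g) g) := by
  induction l with
  | nil => intro g _; rfl
  | cons ps rest ih =>
      intro g hg
      obtain ⟨h1, h2⟩ := pvInner ps g hg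
      simp only [List.foldl_cons]
      rw [h1]
      exact ih _ h2

-- ===== VERDICT (by name: the statement is the Claim_ definition above) =====
theorem MinFeatureValue_spec : Claim_equal_MinFeatureValue := by
  intro lFeature _
  show MinFeatureValue lFeature = MinFeatureValue_alt lFeature
  unfold MinFeatureValue MinFeatureValue_alt
  have h0 : (PySem.Dict.empty : PySem.Dict String Int)
      = pvMapFin (PySem.Dict.empty : PySem.Dict String (List Int)) := rfl
  rw [h0, pvOuter lFeature PySem.Dict.empty (by intro p hp; cases hp)]
  rfl
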